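-- pv_equiv track=rewrite | github.com/koosco/algorithm-study | programmers/Level2/영어 끝말잇기.py | solution
-- ===== SOURCE A (Python) =====
-- def solution(n, words):
--     turn = 0
--     used_words = set()
--     last_word = words[0][0]
--     for i in range(0, len(words), n):
--         turn += 1
--         for j, word in enumerate(words[i:i+n]):
--             if word[0] != last_word or word in used_words:
--                 return [j+1, turn]
--             used_words.add(word)
--             last_word = word[-1]
--     return [0, 0]
-- ===== SOURCE B (Python) =====
-- def solution(n, words):
--     start = words[0][0]
--     # pass 1: first index whose word breaks the letter chain (duplicates ignored)
--     chain_break = len(words)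
--     prev = start
--     for i, w in enumerate(words):
--         if w[0] != prev:
--             chain_break = i
--             break
--         prev = w[-1]
--     # pass 2: index each word's first occurrence
--     first_seen = {}
--     for i, w in enumerate(words):
--         if w not in first_seen:
--             first_seen[w] = i
--     # pass 3: first index whose word already occurred earlier
--     duplicate = len(words)
--     for i, w in enumerate(words):
--         if first_seen[w] < i:
--             duplicate = i
--             break
--     bad = min(chain_break, duplicate)
--     if bad == len(words):
--         return [0, 0]
--     return [bad % n + 1, bad // n + 1]
-- ===== Notes on version B (the rewrite author's own statement) =====
-- stated objective: alternative
-- what changed: B replaces A's single stateful simulation (nested round loops over slices, a mutating used-set and last-letter state deciding failure online) by three independent staged passes -- a chain-break scan, a first-occurrence index dict, and a first-repeat scan -- combined with min() and divmod arithmetic to recover [position, turn].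
-- outside the precondition, e.g. on solution(-1, ['ab', 'xa']): A returns [0, 0], B returns [1, 0]; on solution(1, ['ab', 'ba', 'ab', '']): A returns [1, 3], B raises IndexError
import Mathlib
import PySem

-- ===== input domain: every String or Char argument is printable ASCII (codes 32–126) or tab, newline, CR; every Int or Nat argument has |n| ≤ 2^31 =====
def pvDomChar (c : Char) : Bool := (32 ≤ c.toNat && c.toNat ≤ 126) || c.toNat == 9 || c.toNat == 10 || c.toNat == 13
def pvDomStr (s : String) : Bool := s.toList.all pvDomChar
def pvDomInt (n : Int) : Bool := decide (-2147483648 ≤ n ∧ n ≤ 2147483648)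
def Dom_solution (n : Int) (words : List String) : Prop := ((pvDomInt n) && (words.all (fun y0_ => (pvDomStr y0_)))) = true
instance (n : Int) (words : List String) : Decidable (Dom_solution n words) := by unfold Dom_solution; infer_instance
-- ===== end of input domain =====

-- B replaces A's single stateful simulation (nested round loops over slices with a mutating used-set and
-- last-letter state) by three independent staged passes — a chain-break scan, a first-occurrence index
-- dict, a first-repeat scan — combined with min and divmod; alternative decomposition, same cost.

-- ===== PORT A =====
-- w[0] / w[-1]; exact for nonempty strings (empty words are only reached outside Pre_solution)
def hdCh (w : String) : Char := w.toList.headD ' '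
def lsCh (w : String) : Char := w.toList.getLastD ' '

-- inner 'for j, word in enumerate(words[i:i+n])' loop; Sum.inl = early return, Sum.inr = fall through
def solAInner (turn : Int) : PySem.Set String → Char → Int → List String → Sum (List Int) (PySem.Set String × Char)
  | used, last, _, [] => Sum.inr (used, last)
  | used, last, j, w :: ws =>
    if decide (hdCh w ≠ last) || PySem.Set.contains used w then Sum.inl [j + 1, turn]
    else solAInner turn (PySem.Set.add used w) (lsCh w) (j + 1) ws

-- outer 'for i in range(0, len(words), n)' loop over the range list, state (turn, used, last)
def solAOuter (n : Int) (words : List String) : List Int → Int → PySem.Set String → Char → List Int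
  | [], _, _, _ => [0, 0]
  | i :: is, turn, used, last =>
    match solAInner (turn + 1) used last 0 (PySem.List.slice words (some i) (some (i + n))) with
    | Sum.inl r => r
    | Sum.inr (u, l) => solAOuter n words is (turn + 1) u l

def solution (n : Int) (words : List String) : List Int :=
  solAOuter n words (PySem.List.pyRange 0 (words.length : Int) n) 0 PySem.Set.empty (hdCh (words.headD ""))

-- ===== PORT B =====
-- pass 1: first index whose word breaks the letter chain (duplicates ignored), else len(words)
def findBreak : Char → Int → List String → Int
  | _, i, [] => i
  | prev, i, w :: ws => if hdCh w ≠ prev then i else findBreak (lsCh w) (i + 1) ws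

-- pass 2: dict mapping each word to the index of its first occurrence
def buildFirst : PySem.Dict String Int → Int → List String → PySem.Dict String Int
  | d, _, [] => d
  | d, i, w :: ws =>
    buildFirst (if PySem.Dict.contains d w then d else PySem.Dict.insert d w i) (i + 1) ws

-- pass 3: first index whose word already occurred earlier, else len(words)
-- (the key is always present; the default of getD is never used, matching first_seen[w])
def findDup (d : PySem.Dict String Int) : Int → List String → Int
  | i, [] => i
  | i, w :: ws => if PySem.Dict.getD d w i < i then i else findDup d (i + 1) ws

def solution_alt (n : Int) (words : List String) : List Int :=
  let start := hdCh (words.headD "")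
  let chainBreak := findBreak start 0 words
  let firstSeen := buildFirst PySem.Dict.empty 0 words
  let duplicate := findDup firstSeen 0 words
  let bad := min chainBreak duplicate
  if bad = (words.length : Int) then [0, 0]
  else [PySem.Int.mod bad n + 1, PySem.Int.floordiv bad n + 1]

-- ===== PRECONDITION & SPEC =====
-- a violation-free game: all words distinct, each starting with the previous word's last letter
def NoViol (words : List String) : Prop :=
  words.Nodup ∧ List.IsChain (fun a b => hdCh b = lsCh a) words
-- Pre_ excludes: words = [] and n = 0 (A raises IndexError / ValueError); empty-string words, on which
-- A sometimes still returns (when the empty word lies beyond the first violation) but B's independent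
-- chain scan can reach the empty word and raise IndexError; and n ≤ -1 lists WITH a violation, where
-- A's [0, 0] is an artefact of the empty range(0, len, n) that B's divmod arithmetic does not reproduce
-- (n ≤ -1 stays admitted on violation-free lists, where both return [0, 0]).
def Pre_solution (n : Int) (words : List String) : Prop :=
  words ≠ [] ∧ (∀ w ∈ words, w ≠ "") ∧ (1 ≤ n ∨ (n ≤ -1 ∧ NoViol words))
instance (n : Int) (words : List String) : Decidable (Pre_solution n words) := by
  unfold Pre_solution NoViol; infer_instance

def pvWitness_solution : Int × List String := (2, ["ab", "ba"])

def Spec_solution (n : Int) (words : List String) (out : List Int) : Prop := out = solution_alt n words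
instance (n : Int) (words : List String) (out : List Int) : Decidable (Spec_solution n words out) := by unfold Spec_solution; infer_instance

-- ===== CLAIM (what is proved, stated in full; the proofs are below) =====
def Claim_equal_solution : Prop := ∀ (n : Int) (words : List String), Dom_solution n words → Pre_solution n words → Spec_solution n words (solution n words)

-- ===== LEMMAS AND PROOFS =====

-- proof-side bridge: the flat single-pass form both programs are reduced to
def flatGo (n : Int) : PySem.Set String → Char → Int → List String → List Int
  | _, _, _, [] => [0, 0]
  | seen, last, i, w :: ws =>
    if decide (hdCh w ≠ last) || PySem.Set.contains seen w then
      [PySem.Int.mod i n + 1, PySem.Int.floordiv i n + 1]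
    else flatGo n (PySem.Set.add seen w) (lsCh w) (i + 1) ws

lemma pyRange_pos_nil {a b s : Int} (hs : 0 < s) (h : b ≤ a) :
    PySem.List.pyRange a b s = [] := by
  rw [PySem.List.pyRange_of_pos _ _ hs, if_neg (by omega)]
  rfl

lemma pyRange_neg_nil {a b s : Int} (hs : s < 0) (h : a ≤ b) :
    PySem.List.pyRange a b s = [] := by
  unfold PySem.List.pyRange
  rw [if_neg (by omega), if_neg (by omega), if_neg (by omega)]
  rfl

lemma pyRange_pos_cons {a b s : Int} (hs : 0 < s) (h : a < b) :
    PySem.List.pyRange a b s = a :: PySem.List.pyRange (a + s) b s := by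
  rw [PySem.List.pyRange_of_pos _ _ hs, PySem.List.pyRange_of_pos _ _ hs, if_pos h]
  have h1 : (b - a - 1 + 1 * s) / s = (b - a - 1) / s + 1 :=
    Int.add_mul_ediv_right _ _ (ne_of_gt hs)
  have h2 : (0:Int) ≤ (b - a - 1) / s := Int.ediv_nonneg (by omega) (le_of_lt hs)
  have hcount : ((b - a + s - 1) / s).toNat
      = (if a + s < b then ((b - (a + s) + s - 1) / s).toNat else 0) + 1 := by
    have e1 : b - a + s - 1 = b - a - 1 + 1 * s := by ring
    have e2 : b - (a + s) + s - 1 = b - a - 1 := by ring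
    by_cases hb : a + s < b
    · rw [if_pos hb, e2, e1, h1]; omega
    · rw [if_neg hb]
      have h3 : (b - a - 1) / s = 0 := Int.ediv_eq_zero_of_lt (by omega) (by omega)
      rw [e1, h1, h3]
      rfl
  rw [hcount, List.range_succ_eq_map, List.map_cons, List.map_map]
  refine congrArg₂ _ (by simp) ?_
  refine List.map_congr_left (fun k _ => ?_)
  simp only [Function.comp_apply]
  push_cast
  ring

lemma innerA_flat (n : Int) (hn : 0 < n) :
    ∀ (chunk : List String) (used : PySem.Set String) (last : Char) (c j : Int)
      (rest : List String), 0 ≤ c → 0 ≤ j → j + (chunk.length : Int) ≤ n →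
      (match solAInner (c + 1) used last j chunk with
       | Sum.inl r => flatGo n used last (c * n + j) (chunk ++ rest) = r
       | Sum.inr (u, l) => flatGo n used last (c * n + j) (chunk ++ rest)
           = flatGo n u l (c * n + j + (chunk.length : Int)) rest) := by
  intro chunk
  induction chunk with
  | nil =>
    intro used last c j rest hc hj hlen
    simp [solAInner]
  | cons w ws ih =>
    intro used last c j rest hc hj hlen
    have hjn : j < n := by simp at hlen; omega
    cases hcond : (decide (hdCh w ≠ last) || PySem.Set.contains used w) with
    | true =>
      simp only [solAInner, hcond, if_true, List.cons_append]
      have hmod : PySem.Int.mod (c * n + j) n = j := by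
        rw [PySem.Int.mod_eq_emod_of_pos hn, show c * n + j = j + n * c by ring,
          Int.add_mul_emod_self_left, Int.emod_eq_of_lt hj hjn]
      have hdiv : PySem.Int.floordiv (c * n + j) n = c := by
        rw [PySem.Int.floordiv_eq_ediv_of_pos hn, show c * n + j = j + n * c by ring,
          Int.add_mul_ediv_left _ _ (ne_of_gt hn), Int.ediv_eq_zero_of_lt hj hjn, zero_add]
      simp only [flatGo, hcond, if_true, hmod, hdiv]
    | false =>
      simp only [solAInner, hcond, List.cons_append]
      have hlen' : j + 1 + (ws.length : Int) ≤ n := by simp at hlen ⊢; omega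
      have := ih (PySem.Set.add used w) (lsCh w) c (j + 1) rest hc (by omega) hlen'
      cases hres : solAInner (c + 1) (PySem.Set.add used w) (lsCh w) (j + 1) ws with
      | inl r =>
        rw [hres] at this
        simp only [flatGo, hcond]
        rw [show c * n + j + 1 = c * n + (j + 1) by ring]
        exact this
      | inr ul =>
        rw [hres] at this
        simp only [flatGo, hcond]
        rw [show c * n + j + 1 = c * n + (j + 1) by ring]
        rw [this]
        have hidx : c * n + (j + 1) + (ws.length : Int)
            = c * n + j + (((w :: ws).length : Nat) : Int) := by
          push_cast [List.length_cons]
          ring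
        rw [hidx]
        simp

lemma flatGo_nil (n : Int) (u : PySem.Set String) (l : Char) (i : Int) :
    flatGo n u l i [] = [0, 0] := rfl

lemma outer_flat (n : Int) (hn : 0 < n) (words : List String) :
    ∀ (d : Nat) (c : Nat) (used : PySem.Set String) (last : Char),
      words.length ≤ c * n.toNat + d →
      solAOuter n words
          (PySem.List.pyRange ((c * n.toNat : Nat) : Int) (words.length : Int) n)
          (c : Int) used last
        = flatGo n used last ((c * n.toNat : Nat) : Int) (words.drop (c * n.toNat)) := by
  have hm1 : 1 ≤ n.toNat := by omega
  have hnm : ((n.toNat : Nat) : Int) = n := Int.toNat_of_nonneg hn.le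
  intro d
  induction d with
  | zero =>
    intro c used last hd
    rw [pyRange_pos_nil hn (by exact_mod_cast hd)]
    rw [List.drop_eq_nil_of_le (by omega)]
    rfl
  | succ d ih =>
    intro c used last hd
    by_cases hdone : words.length ≤ c * n.toNat
    · rw [pyRange_pos_nil hn (by exact_mod_cast hdone)]
      rw [List.drop_eq_nil_of_le (by omega)]
      rfl
    · have hlt : ((c * n.toNat : Nat) : Int) < (words.length : Int) := by
        exact_mod_cast Nat.lt_of_not_le hdone
      rw [pyRange_pos_cons hn hlt]
      simp only [solAOuter]
      have hslice : PySem.List.slice words (some ((c * n.toNat : Nat) : Int))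
          (some (((c * n.toNat : Nat) : Int) + n))
          = (words.drop (c * n.toNat)).take n.toNat := by
        have hs := PySem.List.slice_natCast_add words (c * n.toNat) n.toNat
        rw [hnm] at hs
        exact hs
      have hlen : (0:Int) + (((words.drop (c * n.toNat)).take n.toNat).length : Int) ≤ n := by
        have := List.length_take_le n.toNat (words.drop (c * n.toNat))
        omega
      have hsplit : (words.drop (c * n.toNat)).take n.toNat ++ words.drop ((c + 1) * n.toNat)
          = words.drop (c * n.toNat) := by
        rw [show (c + 1) * n.toNat = c * n.toNat + n.toNat by ring, ← List.drop_drop]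
        exact List.take_append_drop _ _
      have key := innerA_flat n hn ((words.drop (c * n.toNat)).take n.toNat) used last
        (c : Int) 0 (words.drop ((c + 1) * n.toNat)) (by positivity) le_rfl (by simpa using hlen)
      rw [hslice]
      cases hres : solAInner ((c : Int) + 1) used last 0
          ((words.drop (c * n.toNat)).take n.toNat) with
      | inl r =>
        rw [hres] at key
        rw [hsplit, show (c : Int) * n + 0 = ((c * n.toNat : Nat) : Int) by push_cast [hnm]; ring]
          at key
        have key' : flatGo n used last ((c * n.toNat : Nat) : Int) (words.drop (c * n.toNat))
            = r := key
        exact key'.symm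
      | inr ul =>
        rw [hres] at key
        rw [hsplit, show (c : Int) * n + 0 = ((c * n.toNat : Nat) : Int) by push_cast [hnm]; ring]
          at key
        have key' : flatGo n used last ((c * n.toNat : Nat) : Int) (words.drop (c * n.toNat))
            = flatGo n ul.1 ul.2
                (((c * n.toNat : Nat) : Int)
                  + (((words.drop (c * n.toNat)).take n.toNat).length : Int))
                (words.drop ((c + 1) * n.toNat)) := key
        have hrange : ((c * n.toNat : Nat) : Int) + n = (((c + 1) * n.toNat : Nat) : Int) := by
          rw [show (c + 1) * n.toNat = c * n.toNat + n.toNat from by ring, Nat.cast_add, hnm]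
        have hturn : ((c : Int) + 1) = (((c + 1 : Nat)) : Int) := by push_cast; ring
        show solAOuter n words
            (PySem.List.pyRange (((c * n.toNat : Nat) : Int) + n) ((words.length : Nat) : Int) n)
            ((c : Int) + 1) ul.1 ul.2
          = flatGo n used last ((c * n.toNat : Nat) : Int) (words.drop (c * n.toNat))
        rw [hrange, hturn, ih (c + 1) ul.1 ul.2 (by omega), key']
        by_cases hfull : n.toNat ≤ words.length - c * n.toNat
        · have hlen2 : ((words.drop (c * n.toNat)).take n.toNat).length = n.toNat := by
            simp; omega
          rw [hlen2,
            show ((c * n.toNat : Nat) : Int) + ((n.toNat : Nat) : Int)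
                = (((c + 1) * n.toNat : Nat) : Int) by push_cast; ring]
        · have hnil : words.drop ((c + 1) * n.toNat) = [] :=
            List.drop_eq_nil_of_le (by omega)
          rw [hnil, flatGo_nil, flatGo_nil]

lemma A_flat (n : Int) (hn : 0 < n) (words : List String) :
    solution n words = flatGo n PySem.Set.empty (hdCh (words.headD "")) 0 words := by
  unfold solution
  have := outer_flat n hn words words.length 0 PySem.Set.empty (hdCh (words.headD ""))
    (by omega)
  simpa using this

lemma flatGo_pass (n : Int) :
    ∀ (tail : List String) (seen : PySem.Set String) (last : Char) (i : Int),
      tail.Nodup →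
      List.IsChain (fun a b => hdCh b = lsCh a) tail →
      (∀ v ∈ tail, v ∉ seen) →
      (∀ w, tail.head? = some w → hdCh w = last) →
      flatGo n seen last i tail = [0, 0] := by
  intro tail
  induction tail with
  | nil => intro seen last i _ _ _ _; rfl
  | cons w ws ih =>
    intro seen last i hnd hch hmem hhd
    have h1 : hdCh w = last := hhd w rfl
    have hw : w ∉ seen := hmem w (by simp)
    have hcond : (decide (hdCh w ≠ last) || PySem.Set.contains seen w) = false := by
      simp [h1, PySem.Set.contains, hw]
    simp only [flatGo, hcond, Bool.false_eq_true, if_false]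
    apply ih
    · exact (List.nodup_cons.mp hnd).2
    · exact List.isChain_of_isChain_cons hch
    · intro v hv
      have hvw : v ≠ w := fun h => (List.nodup_cons.mp hnd).1 (h ▸ hv)
      have hvs : v ∉ seen := hmem v (List.mem_cons_of_mem _ hv)
      rw [PySem.Set.mem_add]
      rintro (h | h)
      · exact hvs h
      · exact hvw h
    · intro w2 hw2
      cases ws with
      | nil => simp at hw2
      | cons b t =>
        simp only [List.head?_cons, Option.some.injEq] at hw2
        subst hw2
        exact (List.isChain_cons_cons.mp hch).1

-- B-side lemmas ------------------------------------------------------------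

lemma le_findBreak : ∀ (l : List String) (prev : Char) (i : Int), i ≤ findBreak prev i l := by
  intro l
  induction l with
  | nil => intro prev i; simp [findBreak]
  | cons w ws ih =>
    intro prev i
    simp only [findBreak]
    split
    · exact le_rfl
    · exact le_trans (by omega) (ih (lsCh w) (i + 1))

lemma le_findDup (d : PySem.Dict String Int) :
    ∀ (l : List String) (i : Int), i ≤ findDup d i l := by
  intro l
  induction l with
  | nil => intro i; simp [findDup]
  | cons w ws ih =>
    intro i
    simp only [findDup]
    split
    · exact le_rfl
    · exact le_trans (by omega) (ih (i + 1))

lemma buildFirst_get?_some :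
    ∀ (l : List String) (d : PySem.Dict String Int) (i : Int) (w : String) (j : Int),
      d.get? w = some j → (buildFirst d i l).get? w = some j := by
  intro l
  induction l with
  | nil => intro d i w j h; exact h
  | cons x xs ih =>
    intro d i w j h
    simp only [buildFirst]
    by_cases hx : x = w
    · subst hx
      have hc : PySem.Dict.contains d x = true := by
        rw [PySem.Dict.contains_eq_isSome_get?, h]; rfl
      rw [if_pos hc]
      exact ih d (i + 1) x j h
    · by_cases hc : PySem.Dict.contains d x = true
      · rw [if_pos hc]; exact ih d (i + 1) w j h
      · rw [if_neg hc]
        exact ih _ (i + 1) w j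
          (by rw [PySem.Dict.get?_insert_of_ne d i (fun h' => hx h'.symm)]; exact h)

lemma buildFirst_get?_none :
    ∀ (l : List String) (d : PySem.Dict String Int) (i : Int) (w : String),
      d.get? w = none → w ∈ l →
      (buildFirst d i l).get? w = some (i + (l.idxOf w : Int)) := by
  intro l
  induction l with
  | nil => intro d i w _ h; simp at h
  | cons x xs ih =>
    intro d i w h0 hmem
    simp only [buildFirst]
    by_cases hx : x = w
    · subst hx
      have hc : PySem.Dict.contains d x = false := by
        rw [PySem.Dict.contains_eq_isSome_get?, h0]; rfl
      rw [if_neg (by simp [hc])]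
      have := buildFirst_get?_some xs (PySem.Dict.insert d x i) (i + 1) x i
        (PySem.Dict.get?_insert_self d x i)
      rw [this, List.idxOf_cons_self]
      try norm_num
    · have hw : w ∈ xs := by
        rcases List.mem_cons.mp hmem with h | h
        · exact absurd h.symm hx
        · exact h
      have hstep : ∀ d' : PySem.Dict String Int, d'.get? w = none →
          (buildFirst d' (i + 1) xs).get? w = some (i + (List.idxOf w (x :: xs) : Int)) := by
        intro d' h'
        rw [ih d' (i + 1) w h' hw, List.idxOf_cons_ne xs hx]
        congr 1
        push_cast
        ring
      by_cases hc : PySem.Dict.contains d x = true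
      · rw [if_pos hc]; exact hstep d h0
      · rw [if_neg hc]
        exact hstep _
          (by rw [PySem.Dict.get?_insert_of_ne d i (fun h' => hx h'.symm)]; exact h0)

-- the repeat test of pass 3 at position |pre| is exactly membership in the prefix
lemma dup_cond (pre ws : List String) (w : String) (dflt : Int) :
    (PySem.Dict.getD (buildFirst PySem.Dict.empty 0 (pre ++ w :: ws)) w dflt
        < (pre.length : Int)) ↔ w ∈ pre := by
  have hmem : w ∈ pre ++ w :: ws := by simp
  have hg := buildFirst_get?_none (pre ++ w :: ws) PySem.Dict.empty 0 w
    (PySem.Dict.get?_empty w) hmem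
  rw [PySem.Dict.getD_of_get?_eq_some _ dflt hg]
  constructor
  · intro hlt
    by_contra hnm
    rw [List.idxOf_append_of_notMem hnm, List.idxOf_cons_self] at hlt
    simp only [zero_add] at hlt
    push_cast at hlt
    omega
  · intro hm
    rw [List.idxOf_append_of_mem hm]
    have := List.idxOf_lt_length_of_mem hm
    simp only [zero_add]
    omega

-- the flat pass equals the staged min-of-two-scans computation
lemma flat_staged (n : Int) (words : List String) :
    ∀ (tail pre : List String) (seen : PySem.Set String) (prev : Char),
      words = pre ++ tail → (∀ v, v ∈ seen ↔ v ∈ pre) →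
      flatGo n seen prev ((pre.length : Nat) : Int) tail =
        (if min (findBreak prev ((pre.length : Nat) : Int) tail)
                (findDup (buildFirst PySem.Dict.empty 0 words) ((pre.length : Nat) : Int) tail)
            = (words.length : Int)
         then [0, 0]
         else [PySem.Int.mod (min (findBreak prev ((pre.length : Nat) : Int) tail)
                  (findDup (buildFirst PySem.Dict.empty 0 words) ((pre.length : Nat) : Int) tail)) n + 1,
               PySem.Int.floordiv (min (findBreak prev ((pre.length : Nat) : Int) tail)
                  (findDup (buildFirst PySem.Dict.empty 0 words) ((pre.length : Nat) : Int) tail)) n + 1]) := by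
  intro tail
  induction tail with
  | nil =>
    intro pre seen prev hw hseen
    subst hw
    simp [flatGo, findBreak, findDup]
  | cons w ws ih =>
    intro pre seen prev hw hseen
    have hlen : ((pre.length : Nat) : Int) < (words.length : Int) := by
      subst hw; simp
    have hdup := dup_cond pre ws w ((pre.length : Nat) : Int)
    rw [← hw] at hdup
    have hcont : PySem.Set.contains seen w = true ↔ w ∈ pre :=
      (PySem.Set.contains_iff seen w).trans (hseen w)
    by_cases hb : hdCh w ≠ prev
    · have hk1 : findBreak prev ((pre.length : Nat) : Int) (w :: ws) = ((pre.length : Nat) : Int) := by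
        simp only [findBreak, if_pos hb]
      have hmin : min (findBreak prev ((pre.length : Nat) : Int) (w :: ws))
          (findDup (buildFirst PySem.Dict.empty 0 words) ((pre.length : Nat) : Int) (w :: ws))
          = ((pre.length : Nat) : Int) := by
        rw [hk1]
        exact min_eq_left (le_findDup _ _ _)
      rw [hmin, if_neg (by omega)]
      simp only [flatGo, decide_eq_true hb, Bool.true_or, if_true]
    · rw [not_not] at hb
      by_cases hm : w ∈ pre
      · have hk2 : findDup (buildFirst PySem.Dict.empty 0 words) ((pre.length : Nat) : Int) (w :: ws)
            = ((pre.length : Nat) : Int) := by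
          simp only [findDup, if_pos (hdup.mpr hm)]
        have hmin : min (findBreak prev ((pre.length : Nat) : Int) (w :: ws))
            (findDup (buildFirst PySem.Dict.empty 0 words) ((pre.length : Nat) : Int) (w :: ws))
            = ((pre.length : Nat) : Int) := by
          rw [hk2]
          exact min_eq_right (le_findBreak _ _ _)
        rw [hmin, if_neg (by omega)]
        have hcw : PySem.Set.contains seen w = true := hcont.mpr hm
        simp only [flatGo, hcw, Bool.or_true, if_true]
      · have hw' : w ∉ seen := fun h => hm ((hseen w).mp h)
        have hcond : (decide (hdCh w ≠ prev) || PySem.Set.contains seen w) = false := by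
          simp [hb, PySem.Set.contains, hw']
        have hnb : ¬ (hdCh w ≠ prev) := by simp [hb]
        have hk1 : findBreak prev ((pre.length : Nat) : Int) (w :: ws)
            = findBreak (lsCh w) (((pre.length : Nat) : Int) + 1) ws := by
          simp only [findBreak, if_neg hnb]
        have hk2 : findDup (buildFirst PySem.Dict.empty 0 words) ((pre.length : Nat) : Int) (w :: ws)
            = findDup (buildFirst PySem.Dict.empty 0 words) (((pre.length : Nat) : Int) + 1) ws := by
          simp only [findDup, if_neg (fun h => hm (hdup.mp h))]
        have hlen' : (((pre ++ [w]).length : Nat) : Int) = ((pre.length : Nat) : Int) + 1 := by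
          simp
        have hinv : ∀ v, v ∈ PySem.Set.add seen w ↔ v ∈ pre ++ [w] := by
          intro v
          rw [PySem.Set.mem_add, List.mem_append, List.mem_singleton, hseen v]
        have := ih (pre ++ [w]) (PySem.Set.add seen w) (lsCh w)
          (by rw [hw, List.append_assoc]; rfl) hinv
        rw [hlen'] at this
        simp only [flatGo, hcond, Bool.false_eq_true, if_false]
        rw [this, hk1, hk2]

lemma alt_eq_flat (n : Int) (words : List String) :
    solution_alt n words = flatGo n PySem.Set.empty (hdCh (words.headD "")) 0 words := by
  have h := flat_staged n words words [] PySem.Set.empty (hdCh (words.headD "")) rfl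
    (by intro v; simp [PySem.Set.empty])
  simp only [List.length_nil, Nat.cast_zero] at h
  rw [h]
  rfl

-- ===== VERDICT (by name: the statement is the Claim_ definition above) =====
theorem solution_spec : Claim_equal_solution := by
  intro n words _ hpre
  unfold Spec_solution
  obtain ⟨hne, hnonempty, hn | ⟨hn, hnd, hch⟩⟩ := hpre
  · rw [A_flat n (by omega) words, alt_eq_flat]
  · have hA : solution n words = [0, 0] := by
      unfold solution
      rw [pyRange_neg_nil (by omega) (by positivity)]
      rfl
    have hB : solution_alt n words = [0, 0] := by
      rw [alt_eq_flat]
      apply flatGo_pass n words PySem.Set.empty _ 0 hnd hch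
      · intro v _
        simp [PySem.Set.empty]
      · intro w hw
        cases words with
        | nil => simp at hw
        | cons a t =>
          simp only [List.head?_cons, Option.some.injEq] at hw
          subst hw
          rfl
    rw [hA, hB]
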